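-- pv_equiv track=rewrite | github.com/lynakim/weathermesh3-public | gen1/utils.py | get_rollout_times
-- ===== SOURCE A (Python) =====
-- def get_rollout_times(dt_dict,min_dt = 1, time_horizon=72):
--     # ex:
--     # dt_dict = {6:3,24:6,72:12}
--     # get_rollout_times(dt_dict, time_horizon = 24*7)
--     # > [1, 2, 3, 4, 5, 6, 9, 12, 15, 18, 21, 24, 30, 36, 42, 48, 54, 60, 66, 72, 84, 96, 108, 120, 132, 144, 156, 168]
--
--     dt_dict[time_horizon] = 100
--     dt_dict = dict(sorted(dt_dict.items()))
--     ts = []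
--     tcurr = 0
--     dtlast = min_dt
--     for t,dt in dt_dict.items():
--         while tcurr < t:
--             tcurr += dtlast
--             if tcurr > time_horizon: return ts
--             ts.append(tcurr)
--         dtlast = dt
--     return ts
-- ===== SOURCE B (Python) =====
-- def get_rollout_times(dt_dict, min_dt=1, time_horizon=72):
--     # Per-segment bulk stepping: each segment's steps are one arithmetic range,
--     # computed with ceil/floor division instead of a unit-by-unit while loop.
--     dt_dict[time_horizon] = 100
--     ts = []
--     tcurr = 0
--     dtlast = min_dt
--     for t, dt in sorted(dt_dict.items()):
--         if tcurr < t: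
--             k = -((tcurr - t) // dtlast)          # ceil((t - tcurr) / dtlast)
--             last = tcurr + k * dtlast
--             if last > time_horizon:
--                 kk = min(k, (time_horizon - tcurr) // dtlast)
--                 ts.extend(tcurr + j * dtlast for j in range(1, kk + 1))
--                 return ts
--             ts.extend(tcurr + j * dtlast for j in range(1, k + 1))
--             tcurr = last
--         dtlast = dt
--     return ts
-- ===== Notes on version B (the rewrite author's own statement) =====
-- stated objective: alternative
-- what changed: The unit-by-unit inner while loop is replaced by a per-segment closed form: for each sorted threshold the number of steps is computed by ceil/floor division and the segment's values are emitted as one arithmetic range, with the horizon cutoff handled by a floor-division count instead of a per-step comparison.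
-- outside the precondition, e.g. on get_rollout_times({2: -1, 3: 5}, 5, 10): A returns [5, 10], B returns [5, 10]; on get_rollout_times({}, -1, -5): A returns [], B returns []; on get_rollout_times({0: 0, 101: 100, -2: -2, 100: 0}, -2, -1): A returns [], B raises ZeroDivisionError
import Mathlib
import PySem

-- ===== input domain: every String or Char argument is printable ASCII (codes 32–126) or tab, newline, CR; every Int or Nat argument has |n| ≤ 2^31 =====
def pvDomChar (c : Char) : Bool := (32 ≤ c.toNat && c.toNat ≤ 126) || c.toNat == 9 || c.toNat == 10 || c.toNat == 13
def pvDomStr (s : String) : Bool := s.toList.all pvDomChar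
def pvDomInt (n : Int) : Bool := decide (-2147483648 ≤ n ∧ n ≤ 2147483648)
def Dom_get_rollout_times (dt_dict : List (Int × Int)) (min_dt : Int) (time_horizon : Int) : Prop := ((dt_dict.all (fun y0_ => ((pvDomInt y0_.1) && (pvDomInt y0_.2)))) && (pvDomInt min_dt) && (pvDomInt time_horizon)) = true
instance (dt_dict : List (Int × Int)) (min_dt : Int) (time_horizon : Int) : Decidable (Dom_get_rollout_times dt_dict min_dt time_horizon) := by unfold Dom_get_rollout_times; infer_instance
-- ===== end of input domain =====

-- B replaces A's unit-by-unit inner while loop by per-segment arithmetic ranges computed with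
-- ceil/floor division (objective: alternative decomposition, same cost). Like A, the Python B
-- mutates the caller's dict (dt_dict[time_horizon] = 100); the equivalence proved is about the
-- return value.


-- ===== PORT A =====
-- inner 'while tcurr < t: tcurr += dtlast; if tcurr > time_horizon: return ts; ts.append(tcurr)'
-- Sum.inl ts = the early 'return ts'; Sum.inr (tcurr, ts) = the while loop finished normally.
-- The '0 < dtlast' test is only a totalization guard: where it is false Python loops forever
-- (such inputs are outside Pre_).
def pvWhileA (time_horizon t dtlast : Int) (tcurr : Int) (ts : List Int) :
    Sum (List Int) (Int × List Int) :=
  if tcurr < t then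
    if 0 < dtlast then
      if tcurr + dtlast > time_horizon then Sum.inl ts
      else pvWhileA time_horizon t dtlast (tcurr + dtlast) (ts ++ [tcurr + dtlast])
    else Sum.inl ts
  else Sum.inr (tcurr, ts)
  termination_by (t - tcurr).toNat
  decreasing_by omega

-- 'for t, dt in dt_dict.items(): … ; dtlast = dt'
def pvForA (time_horizon : Int) : List (Int × Int) → Int → Int → List Int → List Int
  | [], _, _, ts => ts
  | (t, dt) :: rest, tcurr, dtlast, ts =>
    match pvWhileA time_horizon t dtlast tcurr ts with
    | Sum.inl ts' => ts'
    | Sum.inr (tc, ts') => pvForA time_horizon rest tc dt ts'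

def get_rollout_times (dt_dict : List (Int × Int)) (min_dt : Int) (time_horizon : Int) : List Int :=
  -- dt_dict[time_horizon] = 100; dt_dict = dict(sorted(dt_dict.items()))  (keys are unique,
  -- so Python's pair sort is the sort by key)
  let d := (PySem.Dict.ofList dt_dict).insert time_horizon 100
  let items := PySem.List.sorted d.items (fun p => p.1)
  pvForA time_horizon items 0 min_dt []

-- ===== PORT B =====
def pvForB (time_horizon : Int) : List (Int × Int) → Int → Int → List Int → List Int
  | [], _, _, ts => ts
  | (t, dt) :: rest, tcurr, dtlast, ts =>
    if tcurr < t then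
      let k := -(PySem.Int.floordiv (tcurr - t) dtlast)
      let last := tcurr + k * dtlast
      if last > time_horizon then
        let kk := min k (PySem.Int.floordiv (time_horizon - tcurr) dtlast)
        ts ++ (PySem.List.pyRange 1 (kk + 1)).map (fun j => tcurr + j * dtlast)
      else
        pvForB time_horizon rest last dt
          (ts ++ (PySem.List.pyRange 1 (k + 1)).map (fun j => tcurr + j * dtlast))
    else pvForB time_horizon rest tcurr dt ts

def get_rollout_times_alt (dt_dict : List (Int × Int)) (min_dt : Int) (time_horizon : Int) : List Int :=
  let d := (PySem.Dict.ofList dt_dict).insert time_horizon 100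
  let items := PySem.List.sorted d.items (fun p => p.1)
  pvForB time_horizon items 0 min_dt []

-- ===== PRECONDITION & SPEC =====
-- Pre_ excludes inputs with a nonpositive step size (min_dt, or a dt value keyed below the
-- horizon, or any dt value when the horizon is negative): on these A's while loop can run
-- forever (and B's floor division may divide by zero); on a few of them the bad step is never
-- used and A still returns — see the cites in the claim.
def Pre_get_rollout_times (dt_dict : List (Int × Int)) (min_dt : Int) (time_horizon : Int) : Prop :=
  1 ≤ min_dt ∧ ∀ p ∈ dt_dict, (p.1 < time_horizon ∨ time_horizon < 0) → 1 ≤ p.2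
instance (dt_dict : List (Int × Int)) (min_dt : Int) (time_horizon : Int) : Decidable (Pre_get_rollout_times dt_dict min_dt time_horizon) := by unfold Pre_get_rollout_times; infer_instance
def pvWitness_get_rollout_times : (List (Int × Int)) × Int × Int := ([(6, 3), (24, 6)], 1, 72)

def Spec_get_rollout_times (dt_dict : List (Int × Int)) (min_dt : Int) (time_horizon : Int) (out : List Int) : Prop := out = get_rollout_times_alt dt_dict min_dt time_horizon
instance (dt_dict : List (Int × Int)) (min_dt : Int) (time_horizon : Int) (out : List Int) : Decidable (Spec_get_rollout_times dt_dict min_dt time_horizon out) := by unfold Spec_get_rollout_times; infer_instance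

-- ===== CLAIM (what is proved, stated in full; the proofs are below) =====
def Claim_equal_get_rollout_times : Prop := ∀ (dt_dict : List (Int × Int)) (min_dt : Int) (time_horizon : Int), Dom_get_rollout_times dt_dict min_dt time_horizon → Pre_get_rollout_times dt_dict min_dt time_horizon → Spec_get_rollout_times dt_dict min_dt time_horizon (get_rollout_times dt_dict min_dt time_horizon)

-- ===== LEMMAS AND PROOFS =====

-- [1, …, m] shifted one step: the first value splits off and the rest re-bases at tcurr+dtlast
lemma pv_seg_shift (tcurr dtlast m : Int) (hm : 1 ≤ m) :
    (PySem.List.pyRange 1 (m + 1)).map (fun j => tcurr + j * dtlast)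
      = (tcurr + dtlast) ::
        (PySem.List.pyRange 1 m).map (fun j => (tcurr + dtlast) + j * dtlast) := by
  rw [PySem.List.pyRange_one_cons (by omega), List.map_cons]
  have h1 : PySem.List.pyRange (1 + 1) (m + 1) = (PySem.List.pyRange 1 m).map (fun j => j + 1) := by
    rw [PySem.List.pyRange_one, PySem.List.pyRange_one]
    have h2 : (m + 1 - (1 + 1)).toNat = (m - 1).toNat := by omega
    rw [h2, List.map_map]
    apply List.map_congr_left
    intro k _
    simp; omega
  rw [h1, List.map_map]
  congr 1
  · ring
  · apply List.map_congr_left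
    intro k _
    simp only [Function.comp_apply]
    ring

-- the bulk (closed-form) value of A's inner while loop, for a positive step
lemma pv_while_eq_bulk (time_horizon t dtlast : Int) (hd : 0 < dtlast) :
    ∀ (n : Nat) (tcurr : Int) (ts : List Int), (t - tcurr).toNat ≤ n → tcurr < t →
      pvWhileA time_horizon t dtlast tcurr ts =
        (if tcurr + (-(PySem.Int.floordiv (tcurr - t) dtlast)) * dtlast > time_horizon then
          Sum.inl (ts ++ (PySem.List.pyRange 1 (min (-(PySem.Int.floordiv (tcurr - t) dtlast))
              (PySem.Int.floordiv (time_horizon - tcurr) dtlast) + 1)).map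
            (fun j => tcurr + j * dtlast))
        else
          Sum.inr (tcurr + (-(PySem.Int.floordiv (tcurr - t) dtlast)) * dtlast,
            ts ++ (PySem.List.pyRange 1 (-(PySem.Int.floordiv (tcurr - t) dtlast) + 1)).map
              (fun j => tcurr + j * dtlast))) := by
  intro n
  induction n with
  | zero => intro tcurr ts hn hlt; omega
  | succ n ih =>
    intro tcurr ts hn hlt
    have hneg : -(t - tcurr) = tcurr - t := by ring
    have hk : (-(PySem.Int.floordiv (tcurr - t) dtlast) - 1) * dtlast < t - tcurr ∧
        t - tcurr ≤ -(PySem.Int.floordiv (tcurr - t) dtlast) * dtlast := by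
      apply (PySem.Int.neg_floordiv_neg_eq_iff_of_pos hd).mp
      rw [hneg]
    have hkk : PySem.Int.floordiv (time_horizon - tcurr) dtlast * dtlast ≤ time_horizon - tcurr ∧
        time_horizon - tcurr < (PySem.Int.floordiv (time_horizon - tcurr) dtlast + 1) * dtlast :=
      (PySem.Int.floordiv_eq_iff_of_pos hd).mp rfl
    set k := -(PySem.Int.floordiv (tcurr - t) dtlast) with hkdef
    set kk := PySem.Int.floordiv (time_horizon - tcurr) dtlast with hkkdef
    have hk1 : 1 ≤ k := by nlinarith [hk.1, hk.2]
    rw [pvWhileA, if_pos hlt, if_pos hd]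
    by_cases hret : tcurr + dtlast > time_horizon
    · rw [if_pos hret, if_pos (by nlinarith [hk.2])]
      have hkk0 : kk ≤ 0 := by nlinarith [hkk.1]
      have hmin := min_le_right k kk
      rw [PySem.List.pyRange_one_eq_nil (by omega), List.map_nil, List.append_nil]
    · rw [if_neg hret]
      by_cases hdone : t ≤ tcurr + dtlast
      · rw [pvWhileA, if_neg (by omega)]
        have hkeq : k = 1 := by nlinarith [hk.1, hk.2]
        rw [if_neg (by rw [hkeq]; omega), hkeq]
        rw [show (1 : Int) + 1 = 1 + 1 from rfl, PySem.List.pyRange_one_singleton]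
        simp
      · rw [not_le] at hdone
        rw [ih (tcurr + dtlast) (ts ++ [tcurr + dtlast]) (by omega) hdone]
        have hk' : -(PySem.Int.floordiv (tcurr + dtlast - t) dtlast) = k - 1 := by
          have h := (PySem.Int.neg_floordiv_neg_eq_iff_of_pos hd
            (a := t - (tcurr + dtlast)) (q := k - 1)).mpr
            ⟨by nlinarith [hk.1], by nlinarith [hk.2]⟩
          have hneg2 : -(t - (tcurr + dtlast)) = tcurr + dtlast - t := by ring
          rwa [hneg2] at h
        have hkk' : PySem.Int.floordiv (time_horizon - (tcurr + dtlast)) dtlast = kk - 1 := by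
          apply (PySem.Int.floordiv_eq_iff_of_pos hd).mpr
          constructor
          · nlinarith [hkk.1]
          · nlinarith [hkk.2]
        rw [hk', hkk']
        have hkk1 : 1 ≤ kk := by nlinarith [hkk.2]
        by_cases hgt : tcurr + k * dtlast > time_horizon
        · rw [if_pos (by nlinarith [hgt]), if_pos hgt]
          rw [show min (k - 1) (kk - 1) + 1 = min k kk from by omega]
          rw [pv_seg_shift tcurr dtlast (min k kk) (by omega)]
          simp
        · rw [if_neg (by intro hc; exact hgt (by nlinarith [hc])), if_neg hgt]
          rw [show k - 1 + 1 = k from by ring]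
          rw [pv_seg_shift tcurr dtlast k hk1]
          simp only [Sum.inr.injEq, Prod.mk.injEq]
          exact ⟨by ring, by simp⟩

-- outer loop: the invariant is 'the current step is positive, and any nonpositive dt in the
-- remaining items sits on a key beyond the horizon while tcurr has not passed the horizon'
lemma pv_for_eq (time_horizon : Int) :
    ∀ (items : List (Int × Int)) (tcurr dtlast : Int) (ts : List Int), 0 < dtlast →
      (∀ p ∈ items, 1 ≤ p.2 ∨ (time_horizon < p.1 ∧ tcurr ≤ time_horizon)) →
      pvForA time_horizon items tcurr dtlast ts = pvForB time_horizon items tcurr dtlast ts := by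
  intro items
  induction items with
  | nil => intros; rfl
  | cons q rest ih =>
    obtain ⟨t, dt⟩ := q
    intro tcurr dtlast ts hd hinv
    have hq := hinv (t, dt) (List.mem_cons_self)
    by_cases hlt : tcurr < t
    · have hb := pv_while_eq_bulk time_horizon t dtlast hd (t - tcurr).toNat tcurr ts le_rfl hlt
      have hneg : -(t - tcurr) = tcurr - t := by ring
      have hk : (-(PySem.Int.floordiv (tcurr - t) dtlast) - 1) * dtlast < t - tcurr ∧
          t - tcurr ≤ -(PySem.Int.floordiv (tcurr - t) dtlast) * dtlast := by
        apply (PySem.Int.neg_floordiv_neg_eq_iff_of_pos hd).mp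
        rw [hneg]
      simp only [pvForA, pvForB, if_pos hlt]
      rw [hb]
      by_cases hgt : tcurr + (-(PySem.Int.floordiv (tcurr - t) dtlast)) * dtlast > time_horizon
      · rw [if_pos hgt, if_pos hgt]
      · rw [if_neg hgt, if_neg hgt]
        have hlast : t ≤ tcurr + (-(PySem.Int.floordiv (tcurr - t) dtlast)) * dtlast := by
          have := hk.2; omega
        have hle : tcurr + (-(PySem.Int.floordiv (tcurr - t) dtlast)) * dtlast ≤ time_horizon := by
          omega
        apply ih
        · rcases hq with h | h
          · omega
          · omega
        · intro p hp
          rcases hinv p (List.mem_cons_of_mem _ hp) with h | h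
          · exact Or.inl h
          · exact Or.inr ⟨h.1, hle⟩
    · simp only [pvForA, pvForB, if_neg hlt]
      rw [pvWhileA, if_neg hlt]
      apply ih
      · rcases hq with h | h
        · omega
        · omega
      · intro p hp
        exact hinv p (List.mem_cons_of_mem _ hp)

lemma pv_mem_ofList_aux {l : List (Int × Int)} :
    ∀ (d : PySem.Dict Int Int) (p : Int × Int),
      p ∈ (l.foldl (fun acc q => acc.insert q.1 q.2) d).items → p ∈ d.items ∨ p ∈ l := by
  induction l with
  | nil => intro d p h; exact Or.inl h
  | cons q rest ih =>
    intro d p h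
    rcases ih (d.insert q.1 q.2) p h with h' | h'
    · rcases (PySem.Dict.mem_items_insert _ _ _ _).mp h' with h'' | ⟨h'', _⟩
      · right; simp [h'']
      · exact Or.inl h''
    · right; right; exact h'

lemma pv_mem_ofList {p : Int × Int} {l : List (Int × Int)} :
    p ∈ (PySem.Dict.ofList l).items → p ∈ l := by
  intro h
  rcases pv_mem_ofList_aux PySem.Dict.empty p h with h' | h'
  · simp [PySem.Dict.empty] at h'
  · exact h'

-- ===== VERDICT (by name: the statement is the Claim_ definition above) =====
theorem get_rollout_times_spec : Claim_equal_get_rollout_times := by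
  intro dt_dict min_dt time_horizon _hdom hpre
  unfold Spec_get_rollout_times get_rollout_times get_rollout_times_alt
  apply pv_for_eq
  · exact hpre.1
  · intro p hp
    have hp' := (PySem.List.sorted_perm _ _ _).mem_iff.mp hp
    rcases (PySem.Dict.mem_items_insert _ _ _ _).mp hp' with h | ⟨hmem, hne⟩
    · left; simp [h]
    · have hl := pv_mem_ofList hmem
      by_cases h1 : 1 ≤ p.2
      · exact Or.inl h1
      · right
        have := hpre.2 p hl
        constructor <;> omega
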